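-- pv_equiv track=rewrite | github.com/davidfoub/Fluorescent_imaging_analysis | multi_roi_auto_data_processing.py | group_by_treatment
-- ===== SOURCE A (Python) =====
-- def group_by_treatment(resp_db_to_group):
--     treatments = {"cap_and_train": ["21sep22", "22jun22", "26may22", "13aug22"], "cap_notrain": ["01apr23", "02feb23", "30mar23"],
--     "nocap_train": ["07sep22", "15jun22", "20jul22", "27apr22"], "nocap_notrain":["19may23", "23aug23"]}
--
--     grouped_by_treatment ={}
--
--     for treatment, experiments in treatments.items():
--         grouped_by_treatment[treatment] ={}
--         for experiment in experiments:
--             kl=[]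
--             vl=[]
--             for exp, traces in resp_db_to_group.items():
--                 if experiment in exp:
--                     kl.append(exp)
--                     vl.append(traces)
--             kv = dict(zip(kl,vl))
--             grouped_by_treatment[treatment][experiment] = kv
--
--     return grouped_by_treatment
-- ===== SOURCE B (Python) =====
-- def group_by_treatment(resp_db_to_group):
--     treatments = {"cap_and_train": ["21sep22", "22jun22", "26may22", "13aug22"], "cap_notrain": ["01apr23", "02feb23", "30mar23"],
--     "nocap_train": ["07sep22", "15jun22", "20jul22", "27apr22"], "nocap_notrain":["19may23", "23aug23"]}
--
--     # All experiment codes have length 7, so "code in exp" holds exactly when some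
--     # length-7 window of exp equals the code.  Build a flat hash index code -> bucket,
--     # then for each db entry slide a 7-char window over its key and look the window up
--     # in the index -- no per-code substring scans at all.
--     matches = {code: {} for exps in treatments.values() for code in exps}
--     for exp, traces in resp_db_to_group.items():
--         for i in range(len(exp) - 6):
--             w = exp[i:i + 7]
--             if w in matches:
--                 matches[w][exp] = traces
--     return {t: {code: matches[code] for code in exps} for t, exps in treatments.items()}
-- ===== Notes on version B (the rewrite author's own statement) =====
-- stated objective: alternative
-- what changed: A scans resp_db once per experiment code testing 'code in exp'; B instead builds one flat hash index code->bucket and, in a single pass over resp_db, slides a 7-character window over each key and hash-looks the window up in the index (all codes have length 7), so no per-code substring searches remain.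
import Mathlib
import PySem

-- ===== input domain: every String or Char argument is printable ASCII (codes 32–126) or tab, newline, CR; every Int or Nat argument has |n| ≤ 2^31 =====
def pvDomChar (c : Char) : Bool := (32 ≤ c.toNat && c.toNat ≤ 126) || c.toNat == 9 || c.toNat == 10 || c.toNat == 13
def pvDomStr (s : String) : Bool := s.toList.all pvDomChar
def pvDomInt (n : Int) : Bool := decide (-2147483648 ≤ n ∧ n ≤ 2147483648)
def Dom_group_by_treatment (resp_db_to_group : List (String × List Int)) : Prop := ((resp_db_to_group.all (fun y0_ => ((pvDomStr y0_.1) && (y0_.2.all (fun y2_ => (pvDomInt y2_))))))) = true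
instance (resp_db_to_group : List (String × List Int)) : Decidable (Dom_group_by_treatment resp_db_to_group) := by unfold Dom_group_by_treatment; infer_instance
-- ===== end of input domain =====

-- B replaces A's per-experiment-code substring scans of resp_db by a single pass that
-- slides a 7-character window over each key and hash-looks the window up in a flat
-- code -> bucket index (all codes have length 7); objective: alternative algorithm.
-- Nested Python dicts are ported as insertion-ordered association lists.

-- the literal `treatments` dict both Pythons define (insertion order)
def pvTreatments : List (String × List String) :=
  [("cap_and_train", ["21sep22", "22jun22", "26may22", "13aug22"]),
   ("cap_notrain", ["01apr23", "02feb23", "30mar23"]),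
   ("nocap_train", ["07sep22", "15jun22", "20jul22", "27apr22"]),
   ("nocap_notrain", ["19may23", "23aug23"])]

-- ===== PORT A =====
-- for each treatment, for each experiment code: scan resp_db, collect kl/vl, kv = dict(zip(kl, vl))
def group_by_treatment (resp_db_to_group : List (String × List Int)) : List (String × List (String × List (String × List Int))) :=
  pvTreatments.foldl (fun grouped te =>
    grouped ++ [(te.1,
      te.2.foldl (fun m experiment =>
        let klvl : List String × List (List Int) :=
          resp_db_to_group.foldl (fun acc p =>
            if PySem.Str.isIn experiment p.1 then (acc.1 ++ [p.1], acc.2 ++ [p.2]) else acc)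
            ([], [])
        let kv := PySem.Dict.ofList (klvl.1.zip klvl.2)
        m ++ [(experiment, kv.items)]) [])]) []

-- ===== PORT B =====
-- matches = {code: {} for exps in treatments.values() for code in exps}
def pvMatches0 : PySem.Dict String (PySem.Dict String (List Int)) :=
  PySem.Dict.ofList ((pvTreatments.flatMap (·.2)).map (fun code => (code, PySem.Dict.empty)))

-- one pass over resp_db: slide a 7-char window `w = exp[i:i+7]` over each key and,
-- if w is a key of the index ('w in matches'), set matches[w][exp] = traces
-- (re-inserting an existing key overwrites in place, as Python's dict assignment does)
def group_by_treatment_alt (resp_db_to_group : List (String × List Int)) : List (String × List (String × List (String × List Int))) :=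
  let filled := resp_db_to_group.foldl (fun m p =>
    (PySem.List.pyRange 0 (PySem.Str.len p.1 - 6) 1).foldl (fun m i =>
      let w := PySem.Str.slice p.1 (some i) (some (i + 7))
      match m.get? w with
      | some d => m.insert w (d.insert p.1 p.2)
      | none => m) m) pvMatches0
  -- {t: {code: matches[code] for code in exps} for t, exps in treatments.items()}
  -- (`matches[code]` never raises: every code is a key of the index; ported as getD)
  pvTreatments.map (fun te => (te.1, te.2.map (fun code =>
    (code, (filled.getD code PySem.Dict.empty).items))))

-- ===== PRECONDITION & SPEC =====
def Spec_group_by_treatment (resp_db_to_group : List (String × List Int)) (out : List (String × List (String × List (String × List Int)))) : Prop := out = group_by_treatment_alt resp_db_to_group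
instance (resp_db_to_group : List (String × List Int)) (out : List (String × List (String × List (String × List Int)))) : Decidable (Spec_group_by_treatment resp_db_to_group out) := by
  unfold Spec_group_by_treatment
  haveI h : DecidableEq (List (String × List (String × List Int))) := inferInstance
  infer_instance

-- ===== CLAIM (what is proved, stated in full; the proofs are below) =====
def Claim_equal_group_by_treatment : Prop := ∀ (resp_db_to_group : List (String × List Int)), Dom_group_by_treatment resp_db_to_group → Spec_group_by_treatment resp_db_to_group (group_by_treatment resp_db_to_group)

-- ===== LEMMAS AND PROOFS =====

-- A's kl/vl accumulating loop yields the two projections of the filtered list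
theorem klvl_eq (p : String × List Int → Bool) (l : List (String × List Int))
    (acc : List String × List (List Int)) :
    l.foldl (fun acc q =>
      if p q then (acc.1 ++ [q.1], acc.2 ++ [q.2]) else acc) acc
    = (acc.1 ++ (l.filter p).map Prod.fst, acc.2 ++ (l.filter p).map Prod.snd) := by
  induction l generalizing acc with
  | nil => simp
  | cons x xs ih =>
    by_cases h : p x <;> simp [h, ih]

-- A's per-code bucket: dict(zip(kl, vl)) = fold of guarded inserts over the db
theorem bucket_eq (p : String × List Int → Bool) (l : List (String × List Int)) :
    PySem.Dict.ofList
      (((l.filter p).map Prod.fst).zip ((l.filter p).map Prod.snd))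
    = l.foldl (fun d q => if p q then d.insert q.1 q.2 else d) PySem.Dict.empty := by
  rw [List.zip_map']
  have hmap : (l.filter p).map (fun a => (a.1, a.2)) = l.filter p := by simp
  rw [hmap]
  show (l.filter p).foldl (fun d q => d.insert q.1 q.2) PySem.Dict.empty = _
  rw [List.foldl_filter]

-- projection of B's window loop (over an arbitrary list of already-extracted windows)
-- at one key c: if c occurs among the windows, c's bucket gains (exp, traces), once
theorem window_fold_get? (ws : List String) (c exp : String) (traces : List Int)
    (m : PySem.Dict String (PySem.Dict String (List Int))) :
    (ws.foldl (fun m w =>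
      match m.get? w with
      | some d => m.insert w (d.insert exp traces)
      | none => m) m).get? c
    = if c ∈ ws then (m.get? c).map (fun d => d.insert exp traces) else m.get? c := by
  induction ws generalizing m with
  | nil => simp
  | cons w ws ih =>
    simp only [List.foldl_cons]
    rcases hw : m.get? w with _ | d
    · rw [ih]
      by_cases hc : c = w
      · subst hc
        simp [hw, List.mem_cons]
      · simp [List.mem_cons, hc]
    · rw [ih]
      by_cases hc : c = w
      · subst hc
        by_cases hmem : c ∈ ws <;>
          simp [hmem, PySem.Dict.get?_insert_self, hw, PySem.Dict.insert_insert_self]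
      · rw [PySem.Dict.get?_insert_of_ne _ _ hc]
        simp [List.mem_cons, hc]
  
-- a length-7 substring occurs in s iff it is one of the length-7 windows of s
theorem window_mem_iff (c s : String) (hc : c.toList.length = 7) :
    (c ∈ (PySem.List.pyRange 0 (PySem.Str.len s - 6) 1).map
      (fun i => PySem.Str.slice s (some i) (some (i + 7))))
    ↔ PySem.Str.isIn c s = true := by
  rw [PySem.Str.isIn_eq, ← PySem.Chars.exists_prefix_drop_iff_isIn]
  constructor
  · intro hmem
    rcases List.mem_map.mp hmem with ⟨i, hi, hslice⟩
    rcases PySem.List.mem_pyRange_one.mp hi with ⟨h0, _⟩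
    lift i to ℕ using h0 with j
    refine ⟨j, ?_⟩
    rw [List.prefix_iff_eq_take, hc]
    have ht := congrArg String.toList hslice
    rw [PySem.Str.toList_slice, PySem.Chars.slice_eq_listSlice] at ht
    have h7 : ((j : Int) + 7) = ((j : Int) + ((7 : Nat) : Int)) := by norm_num
    rw [h7, PySem.List.slice_natCast_add] at ht
    exact ht.symm
  · rintro ⟨j, hj⟩
    have hlen : 7 ≤ s.toList.length - j := by
      have h1 := hj.length_le
      rw [hc, List.length_drop] at h1
      exact h1
    refine List.mem_map.mpr ⟨(j : Int), PySem.List.mem_pyRange_one.mpr ⟨by positivity, ?_⟩, ?_⟩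
    · rw [PySem.Str.len_eq]
      omega
    · apply String.toList_inj.mp
      rw [PySem.Str.toList_slice, PySem.Chars.slice_eq_listSlice]
      have h7 : ((j : Int) + 7) = ((j : Int) + ((7 : Nat) : Int)) := by norm_num
      rw [h7, PySem.List.slice_natCast_add]
      rw [List.prefix_iff_eq_take, hc] at hj
      exact hj.symm

-- outer fold over the db, projected at key c (c a length-7 code)
theorem db_fold_get? (db : List (String × List Int)) (c : String) (hc : c.toList.length = 7)
    (m : PySem.Dict String (PySem.Dict String (List Int))) :
    (db.foldl (fun m p =>
      (PySem.List.pyRange 0 (PySem.Str.len p.1 - 6) 1).foldl (fun m i =>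
        let w := PySem.Str.slice p.1 (some i) (some (i + 7))
        match m.get? w with
        | some d => m.insert w (d.insert p.1 p.2)
        | none => m) m) m).get? c
    = (db.foldl (fun o q => if PySem.Str.isIn c q.1 then
        Option.map (fun d => d.insert q.1 q.2) o else o) (m.get? c)) := by
  induction db generalizing m with
  | nil => rfl
  | cons q db ih =>
    simp only [List.foldl_cons]
    rw [ih]
    have hmap : (PySem.List.pyRange 0 (PySem.Str.len q.1 - 6) 1).foldl (fun m i =>
        let w := PySem.Str.slice q.1 (some i) (some (i + 7))
        match m.get? w with
        | some d => m.insert w (d.insert q.1 q.2)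
        | none => m) m
      = ((PySem.List.pyRange 0 (PySem.Str.len q.1 - 6) 1).map
          (fun i => PySem.Str.slice q.1 (some i) (some (i + 7)))).foldl (fun m w =>
        match m.get? w with
        | some d => m.insert w (d.insert q.1 q.2)
        | none => m) m := by
      rw [List.foldl_map]
    rw [hmap, window_fold_get?]
    by_cases h : PySem.Str.isIn c q.1 = true
    · rw [if_pos ((window_mem_iff c q.1 hc).mpr h), if_pos h]
    · rw [if_neg (fun hm => h ((window_mem_iff c q.1 hc).mp hm)), if_neg h]

theorem option_fold (db : List (String × List Int)) (c : String)
    (d : PySem.Dict String (List Int)) :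
    db.foldl (fun o q => if PySem.Str.isIn c q.1 then
        Option.map (fun d => d.insert q.1 q.2) o else o) (some d)
    = some (db.foldl (fun d q => if PySem.Str.isIn c q.1 then d.insert q.1 q.2 else d) d) := by
  induction db generalizing d with
  | nil => rfl
  | cons q db ih =>
    by_cases h : PySem.Str.isIn c q.1 = true
    · simp only [List.foldl_cons, if_pos h, Option.map_some]
      exact ih _
    · simp only [List.foldl_cons, if_neg h]
      exact ih _

-- B's filled index, read at any length-7 code present in the initial index,
-- is exactly A's per-code bucket fold
theorem filled_getD (db : List (String × List Int)) (c : String) (hc : c.toList.length = 7)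
    (h0 : pvMatches0.get? c = some PySem.Dict.empty) :
    (db.foldl (fun m p =>
      (PySem.List.pyRange 0 (PySem.Str.len p.1 - 6) 1).foldl (fun m i =>
        let w := PySem.Str.slice p.1 (some i) (some (i + 7))
        match m.get? w with
        | some d => m.insert w (d.insert p.1 p.2)
        | none => m) m) pvMatches0).getD c PySem.Dict.empty
    = db.foldl (fun d q => if PySem.Str.isIn c q.1 then d.insert q.1 q.2 else d)
        PySem.Dict.empty := by
  rw [PySem.Dict.getD_eq_get?_getD, db_fold_get? db c hc, h0, option_fold]
  rfl

-- ===== VERDICT (by name: the statement is the Claim_ definition above) =====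
theorem group_by_treatment_spec : Claim_equal_group_by_treatment := by
  intro l _
  unfold Spec_group_by_treatment
  simp only [group_by_treatment, group_by_treatment_alt, pvTreatments, List.foldl_cons,
    List.foldl_nil, List.map_cons, List.map_nil, List.nil_append, klvl_eq, bucket_eq]
  rw [filled_getD l "21sep22" (by decide) (by decide),
      filled_getD l "22jun22" (by decide) (by decide),
      filled_getD l "26may22" (by decide) (by decide),
      filled_getD l "13aug22" (by decide) (by decide),
      filled_getD l "01apr23" (by decide) (by decide),
      filled_getD l "02feb23" (by decide) (by decide),
      filled_getD l "30mar23" (by decide) (by decide),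
      filled_getD l "07sep22" (by decide) (by decide),
      filled_getD l "15jun22" (by decide) (by decide),
      filled_getD l "20jul22" (by decide) (by decide),
      filled_getD l "27apr22" (by decide) (by decide),
      filled_getD l "19may23" (by decide) (by decide),
      filled_getD l "23aug23" (by decide) (by decide)]
  rfl
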